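-- pv_equiv track=rewrite | github.com/Gppovrm/Diskr | 2/matrix.py | check_reflexivity
-- ===== SOURCE A (Python) =====
-- def check_reflexivity(matrix, vertices):
--     has_one = False
--     has_zero = False
--
--     for i in range(vertices):
--         if matrix[i][i] == 1:
--             has_one = True
--         elif matrix[i][i] == 0:
--             has_zero = True
--
--     if has_one and not has_zero:
--         return "Рефлексивное"
--     elif has_zero and not has_one:
--         return "Антирефлексивное"
--     else:
--         return "Нерефлексивное"
-- ===== SOURCE B (Python) =====
-- def check_reflexivity(matrix, vertices):
--     # Divide-and-conquer semilattice reduction over the diagonal: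
--     # each entry is tagged O (one), Z (zero) or B (irrelevant), tags are
--     # combined with an associative, commutative join with identity B,
--     # recursing by halving the index range; the final element of the
--     # lattice {B, O, Z, M} determines the classification.
--     def tag(d):
--         if d == 1:
--             return "O"
--         if d == 0:
--             return "Z"
--         return "B"
--
--     def join(x, y):
--         if x == "B":
--             return y
--         if y == "B":
--             return x
--         if x == y:
--             return x
--         return "M"
--
--     def classify(lo, hi):
--         if hi - lo <= 0:
--             return "B"
--         if hi - lo == 1:
--             return tag(matrix[lo][lo])
--         mid = (lo + hi) // 2
--         return join(classify(lo, mid), classify(mid, hi))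
--
--     state = classify(0, vertices)
--     if state == "O":
--         return "Рефлексивное"
--     if state == "Z":
--         return "Антирефлексивное"
--     return "Нерефлексивное"
-- ===== Notes on version B (the rewrite author's own statement) =====
-- stated objective: alternative
-- what changed: Replaces A's linear flag-accumulating loop with a divide-and-conquer reduction: diagonal entries are mapped to elements of a four-element join-semilattice {B,O,Z,M} and combined by an associative join over a recursively halved index range, and the final lattice element is translated to the classification string.
import Mathlib
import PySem

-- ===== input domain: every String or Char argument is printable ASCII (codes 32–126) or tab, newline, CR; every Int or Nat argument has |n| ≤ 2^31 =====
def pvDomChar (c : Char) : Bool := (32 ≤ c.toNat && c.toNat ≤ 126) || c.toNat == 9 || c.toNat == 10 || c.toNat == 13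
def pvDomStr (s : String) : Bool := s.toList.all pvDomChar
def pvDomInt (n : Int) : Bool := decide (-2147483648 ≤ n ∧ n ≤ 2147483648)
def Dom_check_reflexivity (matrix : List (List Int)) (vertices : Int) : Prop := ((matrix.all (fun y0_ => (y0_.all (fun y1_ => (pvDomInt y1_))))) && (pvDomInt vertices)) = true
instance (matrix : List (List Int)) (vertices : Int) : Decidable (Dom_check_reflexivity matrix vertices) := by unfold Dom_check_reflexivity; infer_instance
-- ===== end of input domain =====

-- B replaces A's linear flag loop with a divide-and-conquer join-semilattice reduction over the diagonal tags; same output everywhere A returns (alternative decomposition, not faster).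


-- ===== PORT A =====
-- matrix[i][i]; exact wherever the index is valid (Pre_ guarantees this), defaulting harmlessly otherwise
def pvDiagGet (matrix : List (List Int)) (i : Int) : Int :=
  (PySem.List.pyGet? ((PySem.List.pyGet? matrix i).getD []) i).getD 0

def check_reflexivity (matrix : List (List Int)) (vertices : Int) : String :=
  let st := (PySem.List.pyRange 0 vertices 1).foldl
    (fun (s : Bool × Bool) i =>
      let d := pvDiagGet matrix i
      if d == 1 then (true, s.2)
      else if d == 0 then (s.1, true)
      else s) (false, false)
  if st.1 && !st.2 then "Рефлексивное"
  else if st.2 && !st.1 then "Антирефлексивное"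
  else "Нерефлексивное"

-- ===== PORT B =====
def pvTag (d : Int) : String :=
  if d == 1 then "O" else if d == 0 then "Z" else "B"

def pvJoin (x y : String) : String :=
  if x == "B" then y else if y == "B" then x else if x == y then x else "M"

-- B's recursive halving reduction over the index range [lo, hi)
def pvClassify (matrix : List (List Int)) (lo hi : Int) : String :=
  if hi - lo ≤ 0 then "B"
  else if hi - lo = 1 then pvTag (pvDiagGet matrix lo)
  else
    let mid := PySem.Int.floordiv (lo + hi) 2
    pvJoin (pvClassify matrix lo mid) (pvClassify matrix mid hi)
termination_by (hi - lo).toNat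
decreasing_by
  · have hm : PySem.Int.floordiv (lo + hi) 2 = (lo + hi) / 2 :=
      PySem.Int.floordiv_eq_ediv_of_pos (by omega)
    simp only [hm]; omega
  · have hm : PySem.Int.floordiv (lo + hi) 2 = (lo + hi) / 2 :=
      PySem.Int.floordiv_eq_ediv_of_pos (by omega)
    simp only [hm]; omega

def check_reflexivity_alt (matrix : List (List Int)) (vertices : Int) : String :=
  let state := pvClassify matrix 0 vertices
  if state == "O" then "Рефлексивное"
  else if state == "Z" then "Антирефлексивное"
  else "Нерефлексивное"

-- ===== PRECONDITION & SPEC =====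
-- A raises IndexError when some i < vertices has no matrix[i][i]; exactly those inputs are excluded.
def Pre_check_reflexivity (matrix : List (List Int)) (vertices : Int) : Prop :=
  vertices ≤ (matrix.length : Int) ∧ ∀ p ∈ matrix.zipIdx, (p.2 : Int) < vertices → p.2 < p.1.length
instance (matrix : List (List Int)) (vertices : Int) : Decidable (Pre_check_reflexivity matrix vertices) := by unfold Pre_check_reflexivity; infer_instance

def pvWitness_check_reflexivity : List (List Int) × Int := ([[1, 0], [0, 1]], 2)

def Spec_check_reflexivity (matrix : List (List Int)) (vertices : Int) (out : String) : Prop := out = check_reflexivity_alt matrix vertices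
instance (matrix : List (List Int)) (vertices : Int) (out : String) : Decidable (Spec_check_reflexivity matrix vertices out) := by unfold Spec_check_reflexivity; infer_instance

-- ===== CLAIM =====
def Claim_equal_check_reflexivity : Prop := ∀ (matrix : List (List Int)) (vertices : Int), Dom_check_reflexivity matrix vertices → Pre_check_reflexivity matrix vertices → Spec_check_reflexivity matrix vertices (check_reflexivity matrix vertices)

-- ===== LEMMAS AND PROOFS =====

-- encoding of "which of {1, 0} occur on this stretch of the diagonal" as a lattice element
def pvEncode (o z : Bool) : String :=
  if o && z then "M" else if o then "O" else if z then "Z" else "B"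

theorem pv_join_encode (o z o' z' : Bool) :
    pvJoin (pvEncode o z) (pvEncode o' z') = pvEncode (o || o') (z || z') := by
  cases o <;> cases z <;> cases o' <;> cases z' <;> decide

theorem pv_tag_encode (d : Int) : pvTag d = pvEncode (d == 1) (d == 0) := by
  by_cases h1 : d = 1
  · simp [pvTag, pvEncode, h1]
  · by_cases h0 : d = 0 <;> simp [pvTag, pvEncode, h0, h1]

-- the divide-and-conquer reduction computes the two membership bits of the diagonal stretch
theorem pv_classify_spec (m : List (List Int)) : ∀ (n : Nat) (lo hi : Int), (hi - lo).toNat = n →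
    pvClassify m lo hi =
      pvEncode (((PySem.List.pyRange lo hi 1).map (pvDiagGet m)).contains 1)
               (((PySem.List.pyRange lo hi 1).map (pvDiagGet m)).contains 0) := by
  intro n
  induction n using Nat.strong_induction_on with
  | _ n ih =>
    intro lo hi hn
    rw [pvClassify]
    by_cases hle : hi - lo ≤ 0
    · rw [if_pos hle, PySem.List.pyRange_one_eq_nil (by omega)]
      simp [pvEncode]
    · rw [if_neg hle]
      by_cases h1 : hi - lo = 1
      · rw [if_pos h1, show hi = lo + 1 by omega, PySem.List.pyRange_one_singleton]
        simp only [List.map_cons, List.map_nil, List.contains_cons, List.contains_nil,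
          Bool.or_false]
        rw [pv_tag_encode]
        congr 1 <;> simp [BEq.comm]
      · rw [if_neg h1]
        have hm : PySem.Int.floordiv (lo + hi) 2 = (lo + hi) / 2 :=
          PySem.Int.floordiv_eq_ediv_of_pos (by omega)
        have hb : lo < PySem.Int.floordiv (lo + hi) 2 ∧ PySem.Int.floordiv (lo + hi) 2 < hi := by
          rw [hm]; omega
        show pvJoin (pvClassify m lo (PySem.Int.floordiv (lo + hi) 2))
              (pvClassify m (PySem.Int.floordiv (lo + hi) 2) hi) = _
        rw [ih (PySem.Int.floordiv (lo + hi) 2 - lo).toNat (by omega) lo _ rfl,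
            ih (hi - PySem.Int.floordiv (lo + hi) 2).toNat (by omega) _ hi rfl, pv_join_encode,
            PySem.List.pyRange_one_append lo (PySem.Int.floordiv (lo + hi) 2) hi (by omega) (by omega)]
        congr 1 <;> rw [List.map_append, List.contains_append]

-- A's flag-fold over the index list computes the two membership tests on the mapped diagonal.
theorem pv_flags (m : List (List Int)) (l : List Int) (a b : Bool) :
    l.foldl (fun (s : Bool × Bool) i =>
        let d := pvDiagGet m i
        if d == 1 then (true, s.2) else if d == 0 then (s.1, true) else s) (a, b)
      = (a || (l.map (pvDiagGet m)).contains 1, b || (l.map (pvDiagGet m)).contains 0) := by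
  induction l generalizing a b with
  | nil => simp
  | cons i t ih =>
    simp only [List.foldl_cons, List.map_cons, List.contains_cons]
    by_cases h1 : pvDiagGet m i = 1
    · simp only [h1, show ((1:Int) == 1) = true from by decide, show ((1:Int) == 0) = false from by decide, if_true, Bool.false_eq_true, if_false, ih]
      simp
    · by_cases h0 : pvDiagGet m i = 0
      · simp only [h0, show ((0:Int) == 1) = false from by decide, show ((0:Int) == 0) = true from by decide, Bool.false_eq_true, if_false, if_true, ih]
        simp
      · simp only [show (pvDiagGet m i == 1) = false from by simpa using h1, show (pvDiagGet m i == 0) = false from by simpa using h0, Bool.false_eq_true, if_false, ih]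
        rw [show ((1:Int) == pvDiagGet m i) = false from beq_eq_false_iff_ne.mpr (fun h => h1 h.symm),
            show ((0:Int) == pvDiagGet m i) = false from beq_eq_false_iff_ne.mpr (fun h => h0 h.symm)]
        simp

-- the final translation of the lattice element agrees with A's if-chain on the two bits
theorem pv_final (o z : Bool) :
    (if (pvEncode o z) == "O" then "Рефлексивное"
     else if (pvEncode o z) == "Z" then "Антирефлексивное"
     else "Нерефлексивное")
    = (if o && !z then "Рефлексивное"
       else if z && !o then "Антирефлексивное"
       else "Нерефлексивное") := by
  cases o <;> cases z <;> decide

-- ===== VERDICT =====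
theorem check_reflexivity_spec : Claim_equal_check_reflexivity := by
  intro matrix vertices _ _
  show check_reflexivity matrix vertices = check_reflexivity_alt matrix vertices
  unfold check_reflexivity check_reflexivity_alt
  rw [pv_flags, pv_classify_spec matrix (vertices - 0).toNat 0 vertices rfl, pv_final]
  simp only [Bool.false_or]
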